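-- pv_equiv track=rewrite | github.com/nickhamiltonn/playfair-cipher-breaker | helpers.py | bad_scoring_fn
-- ===== SOURCE A (Python) =====
-- def bad_scoring_fn(plain_text, freq_map):
--     starting_score = 10000 + 675
--     multiplier = 1
--
--     for gram in freq_map.keys():
--         multiplier *= 2
--         for word in freq_map[gram].keys():
--             if word.lower() in plain_text:
--                 starting_score -= 1 * multiplier
--
--     return starting_score
-- ===== SOURCE B (Python) =====
-- def bad_scoring_fn(plain_text, freq_map):
--     # Build a substring index once: all substrings of plain_text whose length
--     # occurs among the words, then score each gram by a set lookup per word.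
--     lens = {len(w) for g in freq_map.values() for w in g}
--     n = len(plain_text)
--     subs = {plain_text[i:i + l] for l in lens for i in range(n - l + 1)}
--     return 10675 - sum(
--         2 ** (gi + 1) * sum(1 for w in g if w.lower() in subs)
--         for gi, g in enumerate(freq_map.values())
--     )
-- ===== Notes on version B (the rewrite author's own statement) =====
-- stated objective: faster
-- what changed: A scans plain_text once per word (substring test inside a doubling-multiplier loop); B builds a set of all substrings of plain_text of the occurring word lengths once, then scores each gram by set-membership lookups and a weighted sum 2^(i+1) * hits.
import Mathlib
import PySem

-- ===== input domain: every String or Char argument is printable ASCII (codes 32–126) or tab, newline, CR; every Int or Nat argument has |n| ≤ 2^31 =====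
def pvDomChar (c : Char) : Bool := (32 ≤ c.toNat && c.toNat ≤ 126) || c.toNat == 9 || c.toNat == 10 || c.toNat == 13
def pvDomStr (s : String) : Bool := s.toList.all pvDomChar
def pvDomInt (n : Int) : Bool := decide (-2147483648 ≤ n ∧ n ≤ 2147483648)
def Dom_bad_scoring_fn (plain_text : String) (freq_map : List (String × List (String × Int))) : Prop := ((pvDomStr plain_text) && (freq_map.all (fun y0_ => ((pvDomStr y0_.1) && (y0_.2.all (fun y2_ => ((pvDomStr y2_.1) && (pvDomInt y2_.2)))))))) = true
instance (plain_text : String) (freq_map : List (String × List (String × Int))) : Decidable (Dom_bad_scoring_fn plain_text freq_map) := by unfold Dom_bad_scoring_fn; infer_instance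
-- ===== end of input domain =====

-- B replaces A's per-word substring scan of plain_text by a substring index built once
-- (all substrings of plain_text of the occurring word lengths), scoring each gram by set
-- lookups (objective: faster — one index build replaces W scans of plain_text).

-- ===== PORT A =====
-- A: running score and doubling multiplier; per word a substring test `word.lower() in plain_text`.
def bad_scoring_fn (plain_text : String) (freq_map : List (String × List (String × Int))) : Int :=
  let d := PySem.Dict.ofList freq_map
  (d.keys.foldl (fun (st : Int × Int) gram =>
      let mult := st.2 * 2
      let score := (PySem.Dict.ofList (d.getD gram [])).keys.foldl
        (fun s word => if PySem.Str.isIn (PySem.Str.lower word) plain_text then s - 1 * mult else s)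
        st.1
      (score, mult)) (10000 + 675, 1)).1

-- ===== PORT B =====
-- B-side helpers (the two set comprehensions of Source B)
def pvLens (gs : List (PySem.Dict String Int)) : List Int :=
  PySem.Set.ofList (gs.flatMap (fun g => g.keys.map (fun w => PySem.Str.len w)))

def pvSubs (plain_text : String) (L : List Int) : PySem.Set String :=
  PySem.Set.ofList (L.flatMap (fun l =>
    (PySem.List.pyRange 0 (PySem.Str.len plain_text - l + 1) 1).map (fun i =>
      PySem.Str.slice plain_text (some i) (some (i + l)))))

def bad_scoring_fn_alt (plain_text : String) (freq_map : List (String × List (String × Int))) : Int :=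
  let gs := (PySem.Dict.ofList freq_map).values.map PySem.Dict.ofList
  let subs := pvSubs plain_text (pvLens gs)
  10675 - ((PySem.List.enumerate gs).map (fun p =>
      (2 : Int) ^ (p.1 + 1).toNat *
        ((p.2.keys.countP (fun w => PySem.Set.contains subs (PySem.Str.lower w)) : Nat) : Int))).sum

-- ===== PRECONDITION & SPEC =====
def Spec_bad_scoring_fn (plain_text : String) (freq_map : List (String × List (String × Int))) (out : Int) : Prop := out = bad_scoring_fn_alt plain_text freq_map
instance (plain_text : String) (freq_map : List (String × List (String × Int))) (out : Int) : Decidable (Spec_bad_scoring_fn plain_text freq_map out) := by unfold Spec_bad_scoring_fn; infer_instance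

-- ===== CLAIM (what is proved, stated in full; the proofs are below) =====
def Claim_equal_bad_scoring_fn : Prop := ∀ (plain_text : String) (freq_map : List (String × List (String × Int))), Dom_bad_scoring_fn plain_text freq_map → Spec_bad_scoring_fn plain_text freq_map (bad_scoring_fn plain_text freq_map)

-- ===== LEMMAS AND PROOFS =====

-- the weighted total both programs compute, as one recursion over the per-gram hit counts
def pvWsum : List Int → Int → Int
  | [], _ => 0
  | c :: cs, m => m * 2 * c + pvWsum cs (m * 2)

lemma pv_foldl_if_sub (p : String → Bool) (c : Int) (ws : List String) : ∀ s : Int,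
    ws.foldl (fun s w => if p w then s - 1 * c else s) s = s - c * (ws.countP p : Int) := by
  induction ws with
  | nil => intro s; simp
  | cons w ws ih =>
    intro s
    by_cases hp : p w
    · simp only [List.foldl_cons, ih, List.countP_cons, hp]
      push_cast; ring
    · simp only [List.foldl_cons, ih, List.countP_cons, hp]
      simp

-- A's outer loop through a generic gram-to-dict view
lemma pv_a_fold {κ : Type} (pa : String → Bool) (gf : κ → PySem.Dict String Int) (ks : List κ) :
    ∀ s m : Int,
    (ks.foldl (fun (st : Int × Int) k =>
        ((gf k).keys.foldl (fun s w => if pa w then s - 1 * (st.2 * 2) else s) st.1, st.2 * 2)) (s, m)).1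
      = s - pvWsum (ks.map (fun k => (((gf k).keys.countP pa : Nat) : Int))) m := by
  induction ks with
  | nil => intro s m; simp [pvWsum]
  | cons k ks ih =>
    intro s m
    simp only [List.foldl_cons, List.map_cons]
    rw [pv_foldl_if_sub pa (m * 2) ((gf k).keys) s]
    rw [ih]
    simp only [pvWsum]
    ring

-- B's enumerate-sum in the same shape
lemma pv_b_sum (pb : String → Bool) (gs : List (PySem.Dict String Int)) :
    ∀ (k : Int), 0 ≤ k →
    ((PySem.List.enumerate gs k).map (fun p =>
        (2 : Int) ^ (p.1 + 1).toNat * ((p.2.keys.countP pb : Nat) : Int))).sum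
      = pvWsum (gs.map (fun g => ((g.keys.countP pb : Nat) : Int))) (2 ^ k.toNat) := by
  induction gs with
  | nil => intro k _; simp [pvWsum, PySem.List.enumerate_nil]
  | cons g gs ih =>
    intro k hk
    rw [PySem.List.enumerate_cons]
    simp only [List.map_cons, List.sum_cons, pvWsum, ih (k + 1) (by omega)]
    have h1 : (k + 1).toNat = k.toNat + 1 := by omega
    rw [h1, pow_succ]

-- w lies in the substring index iff it occurs in plain_text, provided its length is indexed
lemma pv_contains_pvSubs (pt : String) (L : List Int) (w : String)
    (hw : (w.toList.length : Int) ∈ L) (hL : ∀ l ∈ L, 0 ≤ l) :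
    PySem.Set.contains (pvSubs pt L) w = PySem.Str.isIn w pt := by
  apply Bool.eq_iff_iff.mpr
  constructor
  · intro h
    have hm : w ∈ L.flatMap (fun l =>
        (PySem.List.pyRange 0 (PySem.Str.len pt - l + 1) 1).map (fun i =>
          PySem.Str.slice pt (some i) (some (i + l)))) :=
      (PySem.Set.mem_ofList _ _).mp ((PySem.Set.contains_iff _ _).mp h)
    obtain ⟨l, hl, hw2⟩ := List.mem_flatMap.mp hm
    obtain ⟨i, hi, rfl⟩ := List.mem_map.mp hw2
    obtain ⟨hi0, _⟩ := PySem.List.mem_pyRange_one.mp hi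
    have hl0 : 0 ≤ l := hL l hl
    rw [PySem.Str.isIn_iff_infix]
    rw [PySem.Str.toList_slice, PySem.Chars.slice_eq_listSlice]
    rw [PySem.List.slice_toNat _ hi0 (by omega : (0:Int) ≤ i + l)]
    exact List.IsInfix.trans (List.IsPrefix.isInfix (List.take_prefix _ _))
      (List.IsSuffix.isInfix (List.drop_suffix _ _))
  · intro h
    rw [PySem.Str.isIn_iff_infix] at h
    obtain ⟨pre, suf, hps⟩ := h
    apply (PySem.Set.contains_iff _ _).mpr
    apply (PySem.Set.mem_ofList _ _).mpr
    apply List.mem_flatMap.mpr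
    refine ⟨(w.toList.length : Int), hw, List.mem_map.mpr ⟨(pre.length : Int), ?_, ?_⟩⟩
    · apply PySem.List.mem_pyRange_one.mpr
      have hlen : pt.toList.length = pre.length + w.toList.length + suf.length := by
        rw [← hps, List.length_append, List.length_append]
      refine ⟨by positivity, ?_⟩
      have hpt : PySem.Str.len pt = (pt.toList.length : Int) := by simp
      rw [hpt]
      omega
    · apply String.toList_injective
      rw [PySem.Str.toList_slice, PySem.Chars.slice_eq_listSlice]
      rw [PySem.List.slice_toNat _ (by positivity : (0:Int) ≤ (pre.length : Int))
        (by positivity : (0:Int) ≤ (pre.length : Int) + (w.toList.length : Int))]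
      have h1 : ((pre.length : Int)).toNat = pre.length := by omega
      have h2 : ((pre.length : Int) + (w.toList.length : Int)).toNat = pre.length + w.toList.length := by
        omega
      rw [h1, h2]
      rw [← hps, List.append_assoc, List.drop_left]
      have h3 : pre.length + w.toList.length - pre.length = w.toList.length := by omega
      rw [h3, List.take_left]

lemma pv_lower_len (w : String) : ((PySem.Str.lower w).toList.length : Int) = (w.toList.length : Int) := by
  rw [PySem.Str.toList_lower]
  simp [PySem.Chars.lower]

-- every length in pvLens is nonnegative
lemma pv_lens_nonneg (gs : List (PySem.Dict String Int)) : ∀ l ∈ pvLens gs, 0 ≤ l := by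
  intro l hl
  unfold pvLens at hl
  obtain ⟨g, _, hg⟩ := List.mem_flatMap.mp ((PySem.Set.mem_ofList _ _).mp hl)
  obtain ⟨w, _, rfl⟩ := List.mem_map.mp hg
  have : PySem.Str.len w = ((w.toList.length : Nat) : Int) := by simp
  rw [this]
  positivity

lemma pv_main (plain_text : String) (freq_map : List (String × List (String × Int))) :
    bad_scoring_fn plain_text freq_map = bad_scoring_fn_alt plain_text freq_map := by
  simp only [bad_scoring_fn, bad_scoring_fn_alt]
  have hnd : (PySem.Dict.ofList freq_map).keys.Nodup := PySem.Dict.nodup_keys_ofList freq_map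
  have hval : (PySem.Dict.ofList freq_map).values.map PySem.Dict.ofList
      = (PySem.Dict.ofList freq_map).keys.map
          (fun k => PySem.Dict.ofList ((PySem.Dict.ofList freq_map).getD k [])) := by
    rw [PySem.Dict.values_eq_map_keys _ hnd [], List.map_map]
    rfl
  rw [hval]
  rw [pv_a_fold (fun w => PySem.Str.isIn (PySem.Str.lower w) plain_text)
      (fun gram => PySem.Dict.ofList ((PySem.Dict.ofList freq_map).getD gram []))
      (PySem.Dict.ofList freq_map).keys (10000 + 675) 1]
  rw [pv_b_sum _ _ 0 (by omega)]
  rw [List.map_map]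
  have hmaps : ((PySem.Dict.ofList freq_map).keys.map
        ((fun (g : PySem.Dict String Int) =>
            ((g.keys.countP (fun w => PySem.Set.contains
                (pvSubs plain_text (pvLens ((PySem.Dict.ofList freq_map).keys.map
                  (fun k => PySem.Dict.ofList ((PySem.Dict.ofList freq_map).getD k [])))))
                (PySem.Str.lower w)) : Nat) : Int))
          ∘ (fun k => PySem.Dict.ofList ((PySem.Dict.ofList freq_map).getD k []))))
      = ((PySem.Dict.ofList freq_map).keys.map
          (fun k => ((((PySem.Dict.ofList ((PySem.Dict.ofList freq_map).getD k [])).keys.countP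
              (fun w => PySem.Str.isIn (PySem.Str.lower w) plain_text) : Nat)) : Int))) := by
    apply List.map_congr_left
    intro k hk
    simp only [Function.comp_apply]
    congr 1
    apply List.countP_congr
    intro w hwk
    have hlen : ((PySem.Str.lower w).toList.length : Int)
        ∈ pvLens ((PySem.Dict.ofList freq_map).keys.map
            (fun k => PySem.Dict.ofList ((PySem.Dict.ofList freq_map).getD k []))) := by
      rw [pv_lower_len]
      unfold pvLens
      apply (PySem.Set.mem_ofList _ _).mpr
      apply List.mem_flatMap.mpr
      refine ⟨PySem.Dict.ofList ((PySem.Dict.ofList freq_map).getD k []),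
        List.mem_map.mpr ⟨k, hk, rfl⟩, List.mem_map.mpr ⟨w, hwk, ?_⟩⟩
      simp
    rw [pv_contains_pvSubs plain_text _ (PySem.Str.lower w) hlen (pv_lens_nonneg _)]

  rw [hmaps]
  norm_num

-- ===== VERDICT (by name: the statement is the Claim_ definition above) =====
theorem bad_scoring_fn_spec : Claim_equal_bad_scoring_fn := by
  intro plain_text freq_map _
  unfold Spec_bad_scoring_fn
  exact pv_main plain_text freq_map
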